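-- pv_equiv track=rewrite | github.com/nickmachnik/aoc2024 | day8/part2.py | calc_antinodes
-- ===== SOURCE A (Python) =====
-- def calc_antinodes(a, b, nrows, ncols):
--     res = []
--     delta = (b[0] - a[0], b[1] - a[1])
--     dfactor = 0
--     while True:
--         anode = (b[0] + dfactor * delta[0], b[1] + dfactor * delta[1])
--         if not in_bounds(anode, nrows, ncols):
--             return res
--         else:
--             dfactor += 1
--             res.append(anode)
--
-- def in_bounds(loc, nrows, ncols):
--     return loc[0] >= 0 and loc[0] < nrows and loc[1] >= 0 and loc[1] < ncols
-- ===== SOURCE B (Python) =====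
-- def calc_antinodes(a, b, nrows, ncols):
--     # Closed form: B itself is the first antinode; compute the largest step
--     # factor f keeping b + f*delta on the grid, then emit all antinodes at once.
--     if not (0 <= b[0] < nrows and 0 <= b[1] < ncols):
--         return []
--     d0, d1 = b[0] - a[0], b[1] - a[1]
--     f = None
--     for bi, di, n in ((b[0], d0, nrows), (b[1], d1, ncols)):
--         if di > 0:
--             c = (n - 1 - bi) // di
--         elif di < 0:
--             c = bi // (-di)
--         else:
--             continue
--         f = c if f is None else min(f, c)
--     return [(b[0] + k * d0, b[1] + k * d1) for k in range(f + 1)]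
-- ===== Notes on version B (the rewrite author's own statement) =====
-- stated objective: alternative
-- what changed: Replaces A's step-by-step while-loop probing each successive antinode with a closed-form computation of the maximal in-bounds step factor via per-axis floor divisions, then builds the whole list in one comprehension.
import Mathlib
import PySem

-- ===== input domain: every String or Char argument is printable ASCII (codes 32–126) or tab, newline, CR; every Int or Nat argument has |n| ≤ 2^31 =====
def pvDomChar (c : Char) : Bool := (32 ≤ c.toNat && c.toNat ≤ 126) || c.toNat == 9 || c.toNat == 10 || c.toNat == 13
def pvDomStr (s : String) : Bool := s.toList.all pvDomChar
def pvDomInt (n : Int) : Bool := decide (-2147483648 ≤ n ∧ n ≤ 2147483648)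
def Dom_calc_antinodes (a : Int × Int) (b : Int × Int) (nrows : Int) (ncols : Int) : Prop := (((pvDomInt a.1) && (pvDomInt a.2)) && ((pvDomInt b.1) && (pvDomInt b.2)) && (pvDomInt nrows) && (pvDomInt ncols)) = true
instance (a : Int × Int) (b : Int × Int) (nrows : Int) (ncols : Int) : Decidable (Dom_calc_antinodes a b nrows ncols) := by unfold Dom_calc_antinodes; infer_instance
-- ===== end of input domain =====

-- B replaces A's one-antinode-at-a-time while loop by a closed-form maximal step
-- factor (per-axis floor divisions) and a single list comprehension.

-- ===== PORT A =====
def in_bounds (loc : Int × Int) (nrows : Int) (ncols : Int) : Bool :=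
  decide (loc.1 ≥ 0) && decide (loc.1 < nrows) && decide (loc.2 ≥ 0) && decide (loc.2 < ncols)

-- A's 'while True' loop; fuel only makes the same computation total (under
-- Pre_ the loop exits strictly before the fuel runs out, see the proofs).
def loopA (b delta : Int × Int) (nrows ncols : Int) (dfactor : Int)
    (res : List (Int × Int)) : Nat → List (Int × Int)
  | 0 => res
  | fuel + 1 =>
    let anode := (b.1 + dfactor * delta.1, b.2 + dfactor * delta.2)
    if !in_bounds anode nrows ncols then res
    else loopA b delta nrows ncols (dfactor + 1) (res ++ [anode]) fuel

def calc_antinodes (a : Int × Int) (b : Int × Int) (nrows : Int) (ncols : Int) : List (Int × Int) :=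
  let delta := (b.1 - a.1, b.2 - a.2)
  loopA b delta nrows ncols 0 [] (nrows.toNat + ncols.toNat + 2)

-- ===== PORT B =====
-- one iteration of Source B's for-loop body: the cap contributed by one axis
def axisCap (bi di n : Int) : Option Int :=
  if di > 0 then some (PySem.Int.floordiv (n - 1 - bi) di)
  else if di < 0 then some (PySem.Int.floordiv bi (-di))
  else none

def combineCap (f c : Option Int) : Option Int :=
  match c with
  | none => f
  | some c => match f with
    | none => some c
    | some f => some (min f c)

def calc_antinodes_alt (a : Int × Int) (b : Int × Int) (nrows : Int) (ncols : Int) : List (Int × Int) :=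
  if ¬ (0 ≤ b.1 ∧ b.1 < nrows ∧ 0 ≤ b.2 ∧ b.2 < ncols) then []
  else
    let d0 := b.1 - a.1
    let d1 := b.2 - a.2
    match combineCap (combineCap none (axisCap b.1 d0 nrows)) (axisCap b.2 d1 ncols) with
    | none => []  -- only when a = b with b in bounds: outside Pre_ (Python B raises TypeError, A diverges)
    | some f => (List.range (f + 1).toNat).map (fun k : Nat => (b.1 + (k : Int) * d0, b.2 + (k : Int) * d1))

-- ===== PRECONDITION & SPEC =====
-- Pre_ excludes exactly the inputs where A never returns: a = b with b on the
-- grid makes delta = (0,0) and A's while-loop spin forever.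
def Pre_calc_antinodes (a : Int × Int) (b : Int × Int) (nrows : Int) (ncols : Int) : Prop :=
  ¬ (a = b ∧ 0 ≤ b.1 ∧ b.1 < nrows ∧ 0 ≤ b.2 ∧ b.2 < ncols)

instance (a : Int × Int) (b : Int × Int) (nrows : Int) (ncols : Int) : Decidable (Pre_calc_antinodes a b nrows ncols) := by unfold Pre_calc_antinodes; infer_instance

def pvWitness_calc_antinodes : (Int × Int) × (Int × Int) × Int × Int := ((0, 0), (1, 1), 4, 4)

def Spec_calc_antinodes (a : Int × Int) (b : Int × Int) (nrows : Int) (ncols : Int) (out : List (Int × Int)) : Prop := out = calc_antinodes_alt a b nrows ncols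
instance (a : Int × Int) (b : Int × Int) (nrows : Int) (ncols : Int) (out : List (Int × Int)) : Decidable (Spec_calc_antinodes a b nrows ncols out) := by unfold Spec_calc_antinodes; infer_instance

-- ===== CLAIM (what is proved, stated in full; the proofs are below) =====
def Claim_equal_calc_antinodes : Prop := ∀ (a : Int × Int) (b : Int × Int) (nrows : Int) (ncols : Int), Dom_calc_antinodes a b nrows ncols → Pre_calc_antinodes a b nrows ncols → Spec_calc_antinodes a b nrows ncols (calc_antinodes a b nrows ncols)

-- ===== LEMMAS AND PROOFS (verdict theorem calc_antinodes_spec at the bottom) =====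

-- per-axis characterisation: for x in [0,n), staying in [0,n) after k steps of
-- size d is exactly k ≤ axisCap (no constraint when d = 0)
lemma axisCap_spec (x d n : Int) (hx : 0 ≤ x) (hxn : x < n) (k : Nat) :
    (0 ≤ x + (k : Int) * d ∧ x + (k : Int) * d < n) ↔
      (match axisCap x d n with
       | none => True
       | some c => (k : Int) ≤ c) := by
  unfold axisCap
  rcases lt_trichotomy d 0 with hd | hd | hd
  · simp only [if_neg (by omega : ¬ d > 0), if_pos hd]
    rw [PySem.Int.le_floordiv_iff_mul_le (by omega : (0:Int) < -d)]
    constructor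
    · rintro ⟨h, _⟩; nlinarith
    · intro h
      refine ⟨by nlinarith, ?_⟩
      nlinarith [mul_nonpos_of_nonneg_of_nonpos (by positivity : (0:Int) ≤ (k:Int)) (le_of_lt hd)]
  · subst hd; simp [hx, hxn]
  · simp only [if_pos hd]
    rw [PySem.Int.le_floordiv_iff_mul_le hd]
    constructor
    · rintro ⟨_, h⟩; nlinarith
    · intro h
      refine ⟨?_, by nlinarith⟩
      nlinarith [mul_nonneg (by positivity : (0:Int) ≤ (k:Int)) (le_of_lt hd)]

lemma axisCap_nonneg_le (x d n : Int) (hx : 0 ≤ x) (hxn : x < n) (c : Int)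
    (hc : axisCap x d n = some c) : 0 ≤ c ∧ c ≤ n - 1 := by
  unfold axisCap at hc
  split_ifs at hc with h1 h2
  · cases hc
    rw [PySem.Int.floordiv_eq_ediv_of_pos h1]
    constructor
    · exact Int.ediv_nonneg (by omega) (by omega)
    · calc (n - 1 - x) / d ≤ n - 1 - x := Int.ediv_le_self _ (by omega)
        _ ≤ n - 1 := by omega
  · cases hc
    rw [PySem.Int.floordiv_eq_ediv_of_pos (by omega : (0:Int) < -d)]
    constructor
    · exact Int.ediv_nonneg hx (by omega)
    · calc x / (-d) ≤ x := Int.ediv_le_self _ hx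
        _ ≤ n - 1 := by omega

-- if after m steps of a nonzero step d we are still inside [0, n), then m < n
lemma step_bound (x d n m : Int) (hm : 0 ≤ m) (hd : d ≠ 0) (hx : 0 ≤ x) (hxn : x < n)
    (h1 : 0 ≤ x + m * d) (h2 : x + m * d < n) : m < n := by
  rcases lt_or_gt_of_ne hd with h | h
  · have hmul : m * 1 ≤ m * (-d) := mul_le_mul_of_nonneg_left (by omega) hm
    nlinarith
  · have hmul : m * 1 ≤ m * d := mul_le_mul_of_nonneg_left (by omega) hm
    nlinarith

-- A's loop, given that being in bounds after k steps is exactly k ≤ m,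
-- unrolls to the tail of the closed-form list.
lemma loopA_eq (b d : Int × Int) (nrows ncols : Int) (m : Int) (hm : 0 ≤ m)
    (hin : ∀ k : Nat, in_bounds (b.1 + (k : Int) * d.1, b.2 + (k : Int) * d.2) nrows ncols = true ↔ (k : Int) ≤ m) :
    ∀ (fuel j : Nat) (res : List (Int × Int)), m + 1 ≤ (j : Int) + (fuel : Int) →
      loopA b d nrows ncols (j : Int) res fuel =
        res ++ (List.range (m.toNat + 1 - j)).map
          (fun i => (b.1 + ((j + i : Nat) : Int) * d.1, b.2 + ((j + i : Nat) : Int) * d.2)) := by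
  intro fuel
  induction fuel with
  | zero =>
    intro j res hfu
    have hz : m.toNat + 1 - j = 0 := by omega
    simp [loopA, hz]
  | succ fuel ih =>
    intro j res hfu
    simp only [loopA]
    by_cases hj : (j : Int) ≤ m
    · have ht : in_bounds (b.1 + (j : Int) * d.1, b.2 + (j : Int) * d.2) nrows ncols = true :=
        (hin j).mpr hj
      rw [if_neg (by rw [ht]; simp)]
      have hrec := ih (j + 1) (res ++ [(b.1 + (j : Int) * d.1, b.2 + (j : Int) * d.2)]) (by push_cast; omega)
      have hj' : ((j + 1 : Nat) : Int) = (j : Int) + 1 := by push_cast; ring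
      rw [hj'] at hrec
      rw [hrec]
      have hlen : m.toNat + 1 - j = (m.toNat + 1 - (j + 1)) + 1 := by omega
      rw [hlen, List.range_succ_eq_map, List.map_cons, List.map_map, List.append_assoc,
        List.cons_append, List.nil_append, Nat.add_zero]
      congr 2
      refine List.map_congr_left ?_
      intro i _
      simp only [Function.comp, Nat.succ_eq_add_one]
      have he : j + (i + 1) = j + 1 + i := by omega
      rw [he]
    · have hf : in_bounds (b.1 + (j : Int) * d.1, b.2 + (j : Int) * d.2) nrows ncols = false := by
        cases h : in_bounds (b.1 + (j : Int) * d.1, b.2 + (j : Int) * d.2) nrows ncols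
        · rfl
        · exact absurd ((hin j).mp h) hj
      rw [if_pos (by rw [hf]; rfl)]
      have hz : m.toNat + 1 - j = 0 := by omega
      simp [hz]

theorem calc_antinodes_spec : Claim_equal_calc_antinodes := by
  intro a b nrows ncols _ hpre
  unfold Spec_calc_antinodes calc_antinodes calc_antinodes_alt
  by_cases hb : 0 ≤ b.1 ∧ b.1 < nrows ∧ 0 ≤ b.2 ∧ b.2 < ncols
  case neg =>
    -- b itself is out of bounds: A's first check fails, both return []
    rw [if_pos hb]
    show loopA b (b.1 - a.1, b.2 - a.2) nrows ncols 0 [] (nrows.toNat + ncols.toNat + 2) = []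
    have h2 : nrows.toNat + ncols.toNat + 2 = (nrows.toNat + ncols.toNat + 1) + 1 := rfl
    rw [h2]
    simp only [loopA]
    rw [if_pos]
    simp only [in_bounds, Int.zero_mul, Int.add_zero, Bool.not_eq_eq_eq_not, Bool.not_true,
      Bool.and_eq_false_iff, decide_eq_false_iff_not]
    by_contra h
    push_neg at h
    exact hb ⟨by tauto, by tauto, by tauto, by tauto⟩
  case pos =>
    rw [if_neg (fun h => h hb)]
    obtain ⟨hb1, hb2, hb3, hb4⟩ := hb
    have hab : ¬ (a = b) := fun h => hpre ⟨h, hb1, hb2, hb3, hb4⟩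
    set d0 := b.1 - a.1 with hd0
    set d1 := b.2 - a.2 with hd1
    have hdne : ¬ (d0 = 0 ∧ d1 = 0) := by
      rintro ⟨h0, h1⟩
      exact hab (Prod.ext (by omega) (by omega))
    -- the combined cap exists and characterises in-bounds steps
    obtain ⟨m, hmem, hm0, hmax⟩ :
        ∃ m, combineCap (combineCap none (axisCap b.1 d0 nrows)) (axisCap b.2 d1 ncols) = some m ∧
          0 ≤ m ∧
          ∀ k : Nat, ((k:Int) ≤ m ↔
            ((0 ≤ b.1 + (k:Int)*d0 ∧ b.1 + (k:Int)*d0 < nrows) ∧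
             (0 ≤ b.2 + (k:Int)*d1 ∧ b.2 + (k:Int)*d1 < ncols))) := by
      have hA0 := fun k => axisCap_spec b.1 d0 nrows hb1 hb2 k
      have hA1 := fun k => axisCap_spec b.2 d1 ncols hb3 hb4 k
      rcases h0 : axisCap b.1 d0 nrows with _ | c0 <;>
        rcases h1 : axisCap b.2 d1 ncols with _ | c1
      · exfalso
        apply hdne
        constructor
        · by_contra h; unfold axisCap at h0; split_ifs at h0 <;> simp_all <;> omega
        · by_contra h; unfold axisCap at h1; split_ifs at h1 <;> simp_all <;> omega
      · refine ⟨c1, rfl, (axisCap_nonneg_le b.2 d1 ncols hb3 hb4 c1 h1).1, ?_⟩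
        intro k
        have h0' := hA0 k; rw [h0] at h0'; simp only at h0'
        have h1' := hA1 k; rw [h1] at h1'; simp only at h1'
        constructor
        · intro hk; exact ⟨h0'.mpr trivial, h1'.mpr hk⟩
        · rintro ⟨_, h⟩; exact h1'.mp h
      · refine ⟨c0, rfl, (axisCap_nonneg_le b.1 d0 nrows hb1 hb2 c0 h0).1, ?_⟩
        intro k
        have h0' := hA0 k; rw [h0] at h0'; simp only at h0'
        have h1' := hA1 k; rw [h1] at h1'; simp only at h1'
        constructor
        · intro hk; exact ⟨h0'.mpr hk, h1'.mpr trivial⟩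
        · rintro ⟨h, _⟩; exact h0'.mp h
      · refine ⟨min c0 c1, rfl, ?_, ?_⟩
        · have := axisCap_nonneg_le b.1 d0 nrows hb1 hb2 c0 h0
          have := axisCap_nonneg_le b.2 d1 ncols hb3 hb4 c1 h1
          omega
        · intro k
          have h0' := hA0 k; rw [h0] at h0'; simp only at h0'
          have h1' := hA1 k; rw [h1] at h1'; simp only at h1'
          constructor
          · intro hk; exact ⟨h0'.mpr (by omega), h1'.mpr (by omega)⟩
          · rintro ⟨h, h'⟩
            have := h0'.mp h; have := h1'.mp h'; omega
    have hmle : m ≤ nrows.toNat + ncols.toNat := by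
      have hc : (m.toNat : Int) = m := by omega
      have h1 := (hmax m.toNat).mp (by omega)
      rw [hc] at h1
      by_cases hd : d0 = 0
      · have hd1 : d1 ≠ 0 := fun h => hdne ⟨hd, h⟩
        have := step_bound b.2 d1 ncols m hm0 hd1 hb3 hb4 h1.2.1 h1.2.2
        omega
      · have := step_bound b.1 d0 nrows m hm0 hd hb1 hb2 h1.1.1 h1.1.2
        omega
    have hin : ∀ k : Nat, in_bounds (b.1 + (k : Int) * d0, b.2 + (k : Int) * d1) nrows ncols = true ↔ (k : Int) ≤ m := by
      intro k
      rw [show (in_bounds (b.1 + (k : Int) * d0, b.2 + (k : Int) * d1) nrows ncols = true) ↔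
        ((0 ≤ b.1 + (k:Int)*d0 ∧ b.1 + (k:Int)*d0 < nrows) ∧
         (0 ≤ b.2 + (k:Int)*d1 ∧ b.2 + (k:Int)*d1 < ncols)) from by
          simp [in_bounds]; tauto]
      exact (hmax k).symm
    have hloop := loopA_eq b (d0, d1) nrows ncols m hm0 hin
      (nrows.toNat + ncols.toNat + 2) 0 [] (by push_cast; omega)
    simp only [Nat.cast_zero] at hloop
    show loopA b (d0, d1) nrows ncols 0 [] (nrows.toNat + ncols.toNat + 2) =
      match combineCap (combineCap none (axisCap b.1 d0 nrows)) (axisCap b.2 d1 ncols) with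
      | none => []
      | some f => (List.range (f + 1).toNat).map (fun k : Nat => (b.1 + (k : Int) * d0, b.2 + (k : Int) * d1))
    rw [hmem, hloop]
    simp only [List.nil_append, Nat.sub_zero]
    have h1 : (m + 1).toNat = m.toNat + 1 := by omega
    rw [h1]
    exact List.map_congr_left (fun i _ => by norm_num)
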